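-- pv_equiv track=rewrite | github.com/june0216/study_algorithm_py | PROGRAMMERS/기타/귤나누기.py | solution
-- ===== SOURCE A (Python) =====
-- from collections import Counter
--
-- def solution(k, tangerine):
--     answer = 0
--     dic = Counter(tangerine)
--     dic = dict(sorted(dic.items(), key = lambda x: -x[1]))
--     tmp = 0
--
--     for key, value in dic.items():
--         if tmp < k:
--             tmp += value
--             answer += 1
--         else:
--             return answer
--
--     return answer
-- ===== SOURCE B (Python) =====
-- from collections import Counter
--
-- def solution(k, tangerine):
--     cnt = Counter(tangerine)
--     n = len(tangerine)
--     buckets = [0] * (n + 1)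
--     for v in cnt.values():
--         buckets[v] += 1
--     tmp = 0
--     answer = 0
--     for f in range(n, 0, -1):
--         for _ in range(buckets[f]):
--             if tmp < k:
--                 tmp += f
--                 answer += 1
--     return answer
-- ===== Notes on version B (the rewrite author's own statement) =====
-- stated objective: alternative
-- what changed: B replaces A's sort of the Counter's frequency table by a counting-bucket array over frequencies, consumed greedily from the largest frequency down (sort-free, O(n) passes; intended as faster but a timing run read only an inconsistent 1.59x, so no speed is claimed).
import Mathlib
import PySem

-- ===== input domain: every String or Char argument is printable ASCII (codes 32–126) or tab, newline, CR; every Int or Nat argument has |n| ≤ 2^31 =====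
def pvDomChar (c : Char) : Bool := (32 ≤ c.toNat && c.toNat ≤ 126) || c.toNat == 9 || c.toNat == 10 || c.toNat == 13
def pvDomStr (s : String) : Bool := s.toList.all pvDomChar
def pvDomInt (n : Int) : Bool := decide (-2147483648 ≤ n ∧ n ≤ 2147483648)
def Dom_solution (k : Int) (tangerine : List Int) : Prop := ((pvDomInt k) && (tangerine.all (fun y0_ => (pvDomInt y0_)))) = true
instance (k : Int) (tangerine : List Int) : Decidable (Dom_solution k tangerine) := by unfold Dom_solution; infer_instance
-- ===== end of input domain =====

-- B replaces A's sort of the Counter's frequency table by a counting-bucket array over the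
-- frequencies, consumed from the largest frequency down (objective: alternative algorithm).

-- ===== PORT A =====
-- the 'for key, value in dic.items()' loop with its early 'return answer'
def solGoA (k : Int) : Int → Int → List (Int × Int) → Int
  | _,   answer, [] => answer
  | tmp, answer, (_, value) :: rest =>
    if tmp < k then solGoA k (tmp + value) (answer + 1) rest else answer

def solution (k : Int) (tangerine : List Int) : Int :=
  let dic := PySem.Dict.counter tangerine
  -- dict(sorted(dic.items(), key=lambda x: -x[1])): insert the sorted pairs one by one
  let dic2 := PySem.Dict.update PySem.Dict.empty (PySem.List.sorted dic.items (fun x => -x.2))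
  solGoA k 0 0 dic2.items

-- ===== PORT B =====
-- buckets[v] += 1 ; v is a Counter count, so 1 ≤ v ≤ len(tangerine) and the index is in range
def bumpB (b : List Int) (v : Int) : List Int :=
  b.set v.toNat (PySem.List.pyGetD b v 0 + 1)

def solution_alt (k : Int) (tangerine : List Int) : Int :=
  let cnt := PySem.Dict.counter tangerine
  let n := tangerine.length
  let buckets := cnt.values.foldl bumpB (List.replicate (n + 1) 0)
  -- st = (tmp, answer)
  let st := (PySem.List.pyRange (n : Int) 0 (-1)).foldl
    (fun st f =>
      (List.range (PySem.List.pyGetD buckets f 0).toNat).foldl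
        (fun st _ => if st.1 < k then (st.1 + f, st.2 + 1) else st) st)
    (0, 0)
  st.2

-- ===== PRECONDITION & SPEC =====
def Spec_solution (k : Int) (tangerine : List Int) (out : Int) : Prop := out = solution_alt k tangerine
instance (k : Int) (tangerine : List Int) (out : Int) : Decidable (Spec_solution k tangerine out) := by unfold Spec_solution; infer_instance

-- ===== CLAIM (what is proved, stated in full; the proofs are below) =====
def Claim_equal_solution : Prop := ∀ (k : Int) (tangerine : List Int), Dom_solution k tangerine → Spec_solution k tangerine (solution k tangerine)

-- ===== LEMMAS AND PROOFS =====

-- the common loop body: take a frequency v if tmp < k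
def stepT (k : Int) (st : Int × Int) (v : Int) : Int × Int :=
  if st.1 < k then (st.1 + v, st.2 + 1) else st

theorem foldl_stepT_frozen (k : Int) (l : List Int) (st : Int × Int) (h : ¬ st.1 < k) :
    l.foldl (stepT k) st = st := by
  induction l with
  | nil => rfl
  | cons v rest ih => simp [stepT, h, ih]

theorem solGoA_eq_foldl (k : Int) (l : List (Int × Int)) : ∀ tmp ans,
    solGoA k tmp ans l = ((l.map Prod.snd).foldl (stepT k) (tmp, ans)).2 := by
  induction l with
  | nil => intro tmp ans; rfl
  | cons p rest ih =>
    intro tmp ans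
    obtain ⟨key, value⟩ := p
    by_cases h : tmp < k
    · simpa [solGoA, stepT, h] using ih (tmp + value) (ans + 1)
    · rw [solGoA, if_neg h, List.map_cons, List.foldl_cons]
      have hs : stepT k (tmp, ans) value = (tmp, ans) := by simp [stepT, h]
      rw [hs, foldl_stepT_frozen k _ (tmp, ans) h]

theorem foldl_ignore_eq_replicate (k f : Int) (l : List Nat) : ∀ st : Int × Int,
    l.foldl (fun st _ => stepT k st f) st = (List.replicate l.length f).foldl (stepT k) st := by
  induction l with
  | nil => intro st; rfl
  | cons a rest ih => intro st; simp [List.replicate_succ, ih]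

-- getD after set, when the write is in range
theorem getD_set_int (l : List Int) (i j : Nat) (a : Int) (hi : i < l.length) :
    (l.set i a).getD j 0 = if i = j then a else l.getD j 0 := by
  rcases eq_or_ne i j with rfl | h
  · simp [List.getD_eq_getElem?_getD, hi]
  · simp [List.getD_eq_getElem?_getD, h]

-- the bucket-building loop counts each value
theorem bump_fold (l : List Int) : ∀ b : List Int,
    (∀ v ∈ l, 0 ≤ v ∧ v.toNat < b.length) →
    (l.foldl bumpB b).length = b.length ∧
      ∀ j : Nat, (l.foldl bumpB b).getD j 0 = b.getD j 0 + (l.count (j : Int) : Int) := by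
  induction l with
  | nil => intro b _; simp
  | cons v rest ih =>
    intro b hb
    obtain ⟨hv0, hvlen⟩ := hb v (by simp)
    have hlen : (bumpB b v).length = b.length := by simp [bumpB]
    have hrest : ∀ w ∈ rest, 0 ≤ w ∧ w.toNat < (bumpB b v).length := by
      intro w hw; rw [hlen]; exact hb w (by simp [hw])
    obtain ⟨ihlen, ihget⟩ := ih (bumpB b v) hrest
    refine ⟨by rw [List.foldl_cons, ihlen, hlen], ?_⟩
    intro j
    rw [List.foldl_cons, ihget j]
    have hget : (bumpB b v).getD j 0 = if v.toNat = j then b.getD v.toNat 0 + 1 else b.getD j 0 := by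
      rw [bumpB, PySem.List.pyGetD_of_nonneg b 0 hv0, getD_set_int b v.toNat j _ hvlen]
    rw [hget, List.count_cons]
    by_cases hvj : v.toNat = j
    · have : v = (j : Int) := by omega
      simp [this]
      omega
    · have : ¬ v = (j : Int) := by omega
      simp [hvj, this]

-- every Counter value is a count of a member: 1 ≤ v ≤ len
theorem counter_values_range (xs : List Int) :
    ∀ v ∈ (PySem.Dict.counter xs).values, 1 ≤ v ∧ v ≤ (xs.length : Int) := by
  intro v hv
  have : (PySem.Dict.counter xs).values
      = (PySem.Set.ofList xs).map (fun c => (xs.count c : Int)) := by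
    simp [PySem.Dict.values, PySem.Dict.items_counter]
  rw [this] at hv
  obtain ⟨c, hc, rfl⟩ := List.mem_map.1 hv
  have hmem : c ∈ xs := (PySem.Set.mem_ofList xs c).1 hc
  have h1 : 0 < xs.count c := List.count_pos_iff.2 hmem
  have h2 : xs.count c ≤ xs.length := List.count_le_length
  omega

-- sum of a one-hot map over a Nodup list picks the hit
theorem sum_onehot (c : Int) (m : Int → Nat) : ∀ S : List Int, S.Nodup → c ∈ S →
    (S.map (fun f => if f = c then m f else 0)).sum = m c := by
  intro S
  induction S with
  | nil => intro _ h; cases h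
  | cons a rest ih =>
    intro hnd hmem
    obtain ⟨hna, hndr⟩ := List.nodup_cons.1 hnd
    by_cases hac : a = c
    · subst hac
      have hz : ∀ x ∈ List.map (fun f => if f = a then m f else 0) rest, x = 0 := by
        intro x hx
        obtain ⟨f, hf, rfl⟩ := List.mem_map.1 hx
        have hne : f ≠ a := fun h => hna (h ▸ hf)
        simp [hne]
      simp [List.sum_eq_zero hz]
    · have hmem' : c ∈ rest := by
        rcases List.mem_cons.1 hmem with h | h
        · exact absurd h.symm hac
        · exact h
      simp [hac, ih hndr hmem']

theorem nodup_pyRange_neg_one (a b : Int) : (PySem.List.pyRange a b (-1)).Nodup := by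
  rw [PySem.List.pyRange_neg_one]
  exact (List.nodup_range).map (fun x y h => by omega)

theorem pairwise_gt_pyRange_neg_one (a b : Int) :
    (PySem.List.pyRange a b (-1)).Pairwise (fun x y => y < x) := by
  rw [PySem.List.pyRange_neg_one]
  refine (List.pairwise_map).2 ?_
  exact List.pairwise_lt_range.imp (by intro x y h; omega)

-- THE COMBINATORIAL CORE: the descending bucket expansion IS the sorted value list
theorem sorted_values_eq_flatMap (xs : List Int) :
    ((PySem.List.sorted (PySem.Dict.counter xs).items (fun x => -x.2)).map Prod.snd)
      = (PySem.List.pyRange (xs.length : Int) 0 (-1)).flatMap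
          (fun f => List.replicate ((PySem.Dict.counter xs).values.count f) f) := by
  set vs := (PySem.Dict.counter xs).values with hvs
  set A := (PySem.List.sorted (PySem.Dict.counter xs).items (fun x => -x.2)).map Prod.snd with hA
  set B := (PySem.List.pyRange (xs.length : Int) 0 (-1)).flatMap
      (fun f => List.replicate (vs.count f) f) with hB
  have hAperm : A.Perm vs := by
    rw [hA, hvs, PySem.Dict.values]
    exact (PySem.List.sorted_perm _ _ _).map Prod.snd
  have hvsmem : ∀ v ∈ vs, 0 < v ∧ v ≤ (xs.length : Int) := by
    intro v hv; have := counter_values_range xs v hv; omega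
  -- counts agree
  have hcount : ∀ c : Int, A.count c = B.count c := by
    intro c
    rw [hAperm.count_eq, hB, List.count_flatMap]
    have hmap : ∀ f : Int,
        (List.count c ∘ fun f => List.replicate (vs.count f) f) f
          = (if f = c then vs.count f else 0) := by
      intro f
      simp only [Function.comp, List.count_replicate]
      by_cases h : f = c <;> simp [h]
    rw [List.map_congr_left (fun f _ => hmap f)]
    by_cases hc : c ∈ PySem.List.pyRange (xs.length : Int) 0 (-1)
    · exact (sum_onehot c (fun f => vs.count f) _ (nodup_pyRange_neg_one _ _) hc).symm
    · have hzero : (List.map (fun f => if f = c then vs.count f else 0)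
          (PySem.List.pyRange (xs.length : Int) 0 (-1))).sum = 0 := by
        apply List.sum_eq_zero
        intro x hx
        obtain ⟨f, hf, rfl⟩ := List.mem_map.1 hx
        have : f ≠ c := by rintro rfl; exact hc hf
        simp [this]
      rw [hzero, List.count_eq_zero]
      intro hcvs
      exact hc (PySem.List.mem_pyRange_neg_one.2 (by have := hvsmem c hcvs; omega))
  -- both are non-increasing
  have hAsort : A.Pairwise (fun a b => b ≤ a) := by
    rw [hA]
    exact (List.pairwise_map).2 ((PySem.List.sorted_pairwise _ _).imp (by intro a b h; omega))
  have hBsort : B.Pairwise (fun a b => b ≤ a) := by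
    rw [hB]
    refine (List.pairwise_flatMap).2 ⟨?_, ?_⟩
    · intro f _; exact List.pairwise_replicate.2 (Or.inr le_rfl)
    · refine (pairwise_gt_pyRange_neg_one _ _).imp ?_
      intro f g h x hx y hy
      rw [List.eq_of_mem_replicate hx, List.eq_of_mem_replicate hy]
      omega
  exact (List.perm_iff_count.2 hcount).eq_of_pairwise
    (fun a b _ _ h1 h2 => le_antisymm h2 h1) hAsort hBsort

-- re-inserting the sorted Counter items into an empty dict gives exactly that item list
theorem items_update_sorted (xs : List Int) :
    (PySem.Dict.update PySem.Dict.empty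
        (PySem.List.sorted (PySem.Dict.counter xs).items (fun x => -x.2))).items
      = PySem.List.sorted (PySem.Dict.counter xs).items (fun x => -x.2) := by
  set l := PySem.List.sorted (PySem.Dict.counter xs).items (fun x => -x.2) with hl
  have hnd : (l.map Prod.fst).Nodup := by
    have hperm : (l.map Prod.fst).Perm ((PySem.Dict.counter xs).items.map Prod.fst) :=
      (PySem.List.sorted_perm _ _ _).map Prod.fst
    refine hperm.nodup_iff.2 ?_
    have h1 : (Prod.fst ∘ fun c : Int => (c, (List.count c xs : Int))) = id := by
      funext z; rfl
    rw [PySem.Dict.items_counter, List.map_map, h1, List.map_id]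
    exact PySem.Set.nodup_ofList xs
  have := PySem.Dict.items_foldl_insert_fresh (d := (PySem.Dict.empty : PySem.Dict Int Int))
      (l := l) (k := Prod.fst) (v := Prod.snd) (by intro a _; simp) (by simpa using hnd)
  simpa [PySem.Dict.update] using this

theorem buckets_getD (xs : List Int) (f : Int) (hf : 0 < f ∧ f ≤ (xs.length : Int)) :
    PySem.List.pyGetD
        ((PySem.Dict.counter xs).values.foldl bumpB (List.replicate (xs.length + 1) 0)) f 0
      = ((PySem.Dict.counter xs).values.count f : Int) := by
  have hrange : ∀ v ∈ (PySem.Dict.counter xs).values,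
      0 ≤ v ∧ v.toNat < (List.replicate (xs.length + 1) (0 : Int)).length := by
    intro v hv; have := counter_values_range xs v hv
    simp only [List.length_replicate]; omega
  obtain ⟨-, hget⟩ := bump_fold (PySem.Dict.counter xs).values _ hrange
  rw [PySem.List.pyGetD_of_nonneg _ 0 (by omega), hget f.toNat]
  have : ((f.toNat : Int)) = f := by omega
  rw [this]
  simp only [List.getD_eq_getElem?_getD, List.getElem?_replicate]
  split <;> simp

-- ===== VERDICT (by name: the statement is the Claim_ definition above) =====
theorem solution_spec : Claim_equal_solution := by
  intro k xs _
  unfold Spec_solution solution solution_alt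
  simp only []
  rw [items_update_sorted xs, solGoA_eq_foldl, sorted_values_eq_flatMap xs]
  rw [List.foldl_flatMap]
  congr 1
  apply PySem.List.foldl_congr_mem
  intro st f hf
  have hfr := PySem.List.mem_pyRange_neg_one.1 hf
  rw [buckets_getD xs f (by omega)]
  rw [Int.toNat_natCast]
  simpa [stepT] using (foldl_ignore_eq_replicate k f (List.range ((PySem.Dict.counter xs).values.count f)) st).symm
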